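-- pv_equiv track=rewrite | github.com/zhaochaoxing/DLBlas | dlblas/op_struct.py | violate_symbolic_constraints
-- ===== SOURCE A (Python) =====
-- def violate_symbolic_constraints(concrete_shapes, sym_shapes) -> bool:
--     # NOTE this could be expensive,
--     # we should probably improve if noticable slowdown
--
--     # for now, we just check when symbolic variables are the same
--     # whether the corresponding concrete values are the same
--     sym2loc = {}
--     for i in range(len(sym_shapes)):
--         for j in range(len(sym_shapes[i])):
--             symbol = sym_shapes[i][j]
--             if symbol in sym2loc:
--                 sym2loc[symbol].append((i, j))
--             else:
--                 sym2loc[symbol] = [(i, j)]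
--
--     try:
--         for sym, locs in sym2loc.items():
--             first_loc = locs[0]
--             first_val = concrete_shapes[first_loc[0]][first_loc[1]]
--             for loc in locs:
--                 if concrete_shapes[loc[0]][loc[1]] != first_val:
--                     return True
--     except IndexError:
--         return True
--     except Exception as e:
--         raise e
--
--     return False
-- ===== SOURCE B (Python) =====
-- def violate_symbolic_constraints(concrete_shapes, sym_shapes) -> bool:
--     # One pass: remember the first concrete value seen for each symbol and
--     # compare every later occurrence against it; IndexError means violation.
--     seen = {}
--     try:
--         for i, row in enumerate(sym_shapes):
--             for j, sym in enumerate(row):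
--                 val = concrete_shapes[i][j]
--                 if sym in seen:
--                     if seen[sym] != val:
--                         return True
--                 else:
--                     seen[sym] = val
--     except IndexError:
--         return True
--     return False
-- ===== Notes on version B (the rewrite author's own statement) =====
-- stated objective: simpler
-- what changed: Collapses A's two phases (build a symbol->list-of-locations map, then re-scan all locations per symbol) into a single pass that keeps one representative concrete value per symbol and compares each occurrence on the fly.
import Mathlib
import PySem

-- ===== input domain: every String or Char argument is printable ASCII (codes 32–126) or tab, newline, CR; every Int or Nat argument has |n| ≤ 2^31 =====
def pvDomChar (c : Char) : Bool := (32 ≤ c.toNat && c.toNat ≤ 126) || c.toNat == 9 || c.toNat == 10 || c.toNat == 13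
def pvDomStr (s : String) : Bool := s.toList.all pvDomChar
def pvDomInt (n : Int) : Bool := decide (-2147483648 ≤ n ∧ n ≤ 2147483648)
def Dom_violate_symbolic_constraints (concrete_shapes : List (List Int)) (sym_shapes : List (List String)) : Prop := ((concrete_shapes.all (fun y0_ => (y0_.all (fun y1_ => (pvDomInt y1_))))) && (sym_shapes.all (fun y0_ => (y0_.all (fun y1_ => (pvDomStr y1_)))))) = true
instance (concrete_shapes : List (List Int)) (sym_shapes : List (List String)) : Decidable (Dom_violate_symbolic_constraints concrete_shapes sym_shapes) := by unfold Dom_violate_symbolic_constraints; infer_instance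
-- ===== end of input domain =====

-- B collapses A's two phases (group all locations per symbol, then re-scan) into one pass
-- keeping a single representative concrete value per symbol; objective: simpler.

-- ===== PORT A =====
-- concrete_shapes[loc[0]][loc[1]] ; none = IndexError
def vscA_read (cs : List (List Int)) (loc : Int × Int) : Option Int :=
  (PySem.List.pyGet? cs loc.1).bind (fun row => PySem.List.pyGet? row loc.2)

-- the inner 'for loc in locs' loop of A's try block; true = 'return True' (mismatch or IndexError)
def vscA_inner (cs : List (List Int)) (fv : Int) : List (Int × Int) → Bool
  | [] => false
  | loc :: rest =>
    match vscA_read cs loc with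
    | none => true
    | some v => if v ≠ fv then true else vscA_inner cs fv rest

-- the 'for sym, locs in sym2loc.items()' loop of A's try block
def vscA_check (cs : List (List Int)) : List (String × List (Int × Int)) → Bool
  | [] => false
  | (_, locs) :: rest =>
    match PySem.List.pyGet? locs 0 with
    | none => true   -- IndexError on locs[0]
    | some fl =>
      match vscA_read cs fl with
      | none => true -- IndexError computing first_val
      | some fv => if vscA_inner cs fv locs then true else vscA_check cs rest

-- the sym2loc-building nested loops (indices i, j always in range, so pyGetD is exact here)
def vscA_build (ss : List (List String)) : PySem.Dict String (List (Int × Int)) :=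
  (PySem.List.pyRange 0 (ss.length : Int) 1).foldl (fun d i =>
    (PySem.List.pyRange 0 ((PySem.List.pyGetD ss i []).length : Int) 1).foldl (fun d j =>
      let symbol := PySem.List.pyGetD (PySem.List.pyGetD ss i []) j ""
      if d.contains symbol then d.modify symbol [] (fun l => l ++ [(i, j)])
      else d.insert symbol [(i, j)]) d) PySem.Dict.empty

def violate_symbolic_constraints (concrete_shapes : List (List Int)) (sym_shapes : List (List String)) : Bool :=
  vscA_check concrete_shapes (vscA_build sym_shapes).items

-- ===== PORT B =====
-- the inner 'for j, sym in enumerate(row)' loop; none = 'return True', some seen' = fall through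
def vscB_inner (cs : List (List Int)) (i : Int) :
    List (Int × String) → PySem.Dict String Int → Option (PySem.Dict String Int)
  | [], seen => some seen
  | (j, sym) :: rest, seen =>
    match (PySem.List.pyGet? cs i).bind (fun row => PySem.List.pyGet? row j) with
    | none => none   -- IndexError
    | some val =>
      match seen.get? sym with
      | some w => if w ≠ val then none else vscB_inner cs i rest seen
      | none => vscB_inner cs i rest (seen.insert sym val)

-- the outer 'for i, row in enumerate(sym_shapes)' loop
def vscB_rows (cs : List (List Int)) :
    List (Int × List String) → PySem.Dict String Int → Bool
  | [], _ => false
  | (i, row) :: rest, seen =>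
    match vscB_inner cs i (PySem.List.enumerate row) seen with
    | none => true
    | some seen' => vscB_rows cs rest seen'

def violate_symbolic_constraints_alt (concrete_shapes : List (List Int)) (sym_shapes : List (List String)) : Bool :=
  vscB_rows concrete_shapes (PySem.List.enumerate sym_shapes) PySem.Dict.empty

-- ===== PRECONDITION & SPEC =====
def Spec_violate_symbolic_constraints (concrete_shapes : List (List Int)) (sym_shapes : List (List String)) (out : Bool) : Prop := out = violate_symbolic_constraints_alt concrete_shapes sym_shapes
instance (concrete_shapes : List (List Int)) (sym_shapes : List (List String)) (out : Bool) : Decidable (Spec_violate_symbolic_constraints concrete_shapes sym_shapes out) := by unfold Spec_violate_symbolic_constraints; infer_instance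

-- ===== CLAIM (what is proved, stated in full; the proofs are below) =====
def Claim_equal_violate_symbolic_constraints : Prop := ∀ (concrete_shapes : List (List Int)) (sym_shapes : List (List String)), Dom_violate_symbolic_constraints concrete_shapes sym_shapes → Spec_violate_symbolic_constraints concrete_shapes sym_shapes (violate_symbolic_constraints concrete_shapes sym_shapes)

-- ===== LEMMAS AND PROOFS =====

-- all (symbol, location) pairs of sym_shapes, in reading order
def vscPos (ss : List (List String)) : List (String × (Int × Int)) :=
  (PySem.List.enumerate ss).flatMap (fun p =>
    (PySem.List.enumerate p.2).map (fun q => (q.2, (p.1, q.1))))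

-- location of the first occurrence of symbol s
def vscFirst? (poss : List (String × (Int × Int))) (s : String) : Option (Int × Int) :=
  (poss.find? (fun p => p.1 == s)).map (·.2)

-- the common meaning of 'returns False': every location is readable and agrees
-- with the first occurrence of its symbol
def vscCons (cs : List (List Int)) (poss : List (String × (Int × Int))) : Prop :=
  ∀ p ∈ poss, ∃ v, vscA_read cs p.2 = some v ∧
    ∀ q, vscFirst? poss p.1 = some q → vscA_read cs q = some v

lemma vscFirst?_cons_self (s : String) (loc : Int × Int) (rest : List (String × (Int × Int))) :
    vscFirst? ((s, loc) :: rest) s = some loc := by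
  simp [vscFirst?, List.find?]

lemma vscFirst?_cons_ne (s t : String) (loc : Int × Int) (rest : List (String × (Int × Int)))
    (h : t ≠ s) : vscFirst? ((s, loc) :: rest) t = vscFirst? rest t := by
  have hb : (s == t) = false := by simp [Ne.symm h]
  simp [vscFirst?, List.find?, hb]

-- ----- A side -----

-- A's if/else branch (append vs fresh-list insert) is exactly Dict.modify
lemma vsc_step_eq (d : PySem.Dict String (List (Int × Int))) (sym : String) (loc : Int × Int) :
    (if d.contains sym then d.modify sym [] (fun l => l ++ [loc]) else d.insert sym [loc])
      = d.modify sym [] (fun l => l ++ [loc]) := by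
  by_cases h : d.contains sym = true
  · rw [if_pos h]
  · rw [if_neg h]
    have h' : d.contains sym = false := by revert h; cases d.contains sym <;> simp
    show d.insert sym [loc] = d.insert sym (d.getD sym [] ++ [loc])
    rw [PySem.Dict.getD_of_not_contains d [] h']
    rfl

-- a fold over range(len(xs)) reading xs[i] is a fold over enumerate(xs)
lemma vsc_range_enum_aux {α β : Type} (dflt : β) (g : α → Int → β → α) :
    ∀ (xs pre : List β) (init : α),
      (PySem.List.pyRange (pre.length : Int) (((pre ++ xs).length : Nat) : Int) 1).foldl
        (fun acc i => g acc i (PySem.List.pyGetD (pre ++ xs) i dflt)) init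
      = (PySem.List.enumerate xs (pre.length : Int)).foldl (fun acc q => g acc q.1 q.2) init
  | [], pre, init => by
      simp [PySem.List.pyRange_one_eq_nil (le_refl ((pre.length : Nat) : Int)),
        PySem.List.enumerate_nil]
  | x :: xs, pre, init => by
      rw [List.append_cons]
      have hlt : (pre.length : Int) < ((((pre ++ [x]) ++ xs).length : Nat) : Int) := by
        simp
      rw [PySem.List.pyRange_one_cons hlt]
      simp only [List.foldl_cons]
      have hget : PySem.List.pyGetD ((pre ++ [x]) ++ xs) (pre.length : Int) dflt = x := by
        rw [PySem.List.pyGetD_eq_getElem _ dflt (by positivity) (by simp)]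
        rw [List.getElem_append_left (by simp)]
        simp
      rw [hget]
      rw [PySem.List.enumerate_cons]
      simp only [List.foldl_cons]
      have hlen : ((pre ++ [x]).length : Int) = (pre.length : Int) + 1 := by simp
      rw [← hlen]
      exact vsc_range_enum_aux dflt g xs (pre ++ [x]) (g init (pre.length : Int) x)

lemma vsc_range_enum {α β : Type} (dflt : β) (xs : List β) (g : α → Int → β → α) (init : α) :
    (PySem.List.pyRange 0 ((xs.length : Nat) : Int) 1).foldl
      (fun acc i => g acc i (PySem.List.pyGetD xs i dflt)) init
    = (PySem.List.enumerate xs).foldl (fun acc q => g acc q.1 q.2) init := by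
  simpa using vsc_range_enum_aux dflt g xs [] init

-- the nested per-row folds flattened into one fold over all positions
lemma vsc_build_flat :
    ∀ (l : List (Int × List String)) (d : PySem.Dict String (List (Int × Int))),
      l.foldl (fun d q => (PySem.List.enumerate q.2).foldl
          (fun d r => d.modify r.2 [] (fun ls => ls ++ [(q.1, r.1)])) d) d
      = (l.flatMap (fun p => (PySem.List.enumerate p.2).map (fun q => (q.2, (p.1, q.1))))).foldl
          (fun d p => d.modify p.1 [] (fun ls => ls ++ [p.2])) d
  | [], _ => rfl
  | q :: rest, d => by
      simp only [List.foldl_cons, List.flatMap_cons, List.foldl_append, List.foldl_map]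
      rw [vsc_build_flat rest]

lemma vscA_build_eq (ss : List (List String)) :
    vscA_build ss = (vscPos ss).foldl
      (fun d p => d.modify p.1 [] (fun l => l ++ [p.2])) PySem.Dict.empty := by
  have h1 := vsc_range_enum ([] : List String) ss
      (fun (d : PySem.Dict String (List (Int × Int))) (i : Int) (row : List String) =>
        (PySem.List.pyRange 0 ((row.length : Nat) : Int) 1).foldl (fun d j =>
          let symbol := PySem.List.pyGetD row j ""
          if d.contains symbol then d.modify symbol [] (fun l => l ++ [(i, j)])
          else d.insert symbol [(i, j)]) d)
      (PySem.Dict.empty : PySem.Dict String (List (Int × Int)))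
  have h2 : vscA_build ss = _ := h1
  rw [h2]
  have h3 : (fun (d : PySem.Dict String (List (Int × Int))) (q : Int × List String) =>
        (PySem.List.pyRange 0 ((q.2.length : Nat) : Int) 1).foldl (fun d j =>
          let symbol := PySem.List.pyGetD q.2 j ""
          if d.contains symbol then d.modify symbol [] (fun l => l ++ [(q.1, j)])
          else d.insert symbol [(q.1, j)]) d)
      = (fun d q => (PySem.List.enumerate q.2).foldl
          (fun d r => d.modify r.2 [] (fun ls => ls ++ [(q.1, r.1)])) d) := by
    funext d q
    have h4 := vsc_range_enum ("" : String) q.2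
      (fun (d : PySem.Dict String (List (Int × Int))) (j : Int) (sym : String) =>
        if d.contains sym then d.modify sym [] (fun l => l ++ [(q.1, j)])
        else d.insert sym [(q.1, j)]) d
    refine Eq.trans (h4.trans ?_) rfl
    simp only [vsc_step_eq]
  rw [h3]
  exact vsc_build_flat (PySem.List.enumerate ss) PySem.Dict.empty

lemma vscA_inner_false_iff (cs : List (List Int)) (fv : Int) (locs : List (Int × Int)) :
    vscA_inner cs fv locs = false ↔ ∀ loc ∈ locs, vscA_read cs loc = some fv := by
  induction locs with
  | nil => simp [vscA_inner]
  | cons loc rest ih =>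
    cases h : vscA_read cs loc with
    | none => simp [vscA_inner, h]
    | some v =>
      by_cases hv : v = fv
      · subst hv; simp [vscA_inner, h, ih]
      · simp only [vscA_inner, h, ne_eq, hv, not_false_iff, if_pos]
        constructor
        · intro hf; cases hf
        · intro hall; exact absurd (hall loc (by simp)) (by simp [h, hv])

def vscGroupOK (cs : List (List Int)) (g : String × List (Int × Int)) : Prop :=
  ∃ fl fv, PySem.List.pyGet? g.2 0 = some fl ∧ vscA_read cs fl = some fv ∧
    ∀ loc ∈ g.2, vscA_read cs loc = some fv

lemma vscA_check_false_iff (cs : List (List Int)) (gs : List (String × List (Int × Int))) :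
    vscA_check cs gs = false ↔ ∀ g ∈ gs, vscGroupOK cs g := by
  induction gs with
  | nil => simp [vscA_check]
  | cons g rest ih =>
    obtain ⟨s, locs⟩ := g
    cases h0 : PySem.List.pyGet? locs 0 with
    | none =>
      simp only [vscA_check, h0, Bool.true_eq_false, false_iff]
      intro hall
      obtain ⟨fl, fv, hfl, _, _⟩ := hall (s, locs) (by simp)
      simp [h0] at hfl
    | some fl =>
      cases hr : vscA_read cs fl with
      | none =>
        simp only [vscA_check, h0, hr, Bool.true_eq_false, false_iff]
        intro hall
        obtain ⟨fl', fv, hfl', hr', _⟩ := hall (s, locs) (by simp)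
        rw [h0] at hfl'; cases hfl'
        simp [hr] at hr'
      | some fv =>
        cases hin : vscA_inner cs fv locs with
        | true =>
          simp only [vscA_check, h0, hr, hin, if_pos, Bool.true_eq_false, false_iff]
          intro hall
          obtain ⟨fl', fv', hfl', hr', hall'⟩ := hall (s, locs) (by simp)
          rw [h0] at hfl'; cases hfl'
          rw [hr] at hr'; cases hr'
          rw [(vscA_inner_false_iff cs fv locs).2 hall'] at hin
          cases hin
        | false =>
          have h1 : vscA_check cs ((s, locs) :: rest) = vscA_check cs rest := by
            simp [vscA_check, h0, hr, hin]
          rw [h1, ih]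
          constructor
          · intro hrest g hg
            rcases List.mem_cons.1 hg with hgg | hgg
            · subst hgg
              exact ⟨fl, fv, h0, hr, (vscA_inner_false_iff cs fv locs).1 hin⟩
            · exact hrest g hgg
          · intro hall g hg; exact hall g (List.mem_cons_of_mem _ hg)

lemma vsc_pyGet?_zero (xs : List (Int × Int)) : PySem.List.pyGet? xs 0 = xs.head? := by
  cases xs <;> simp [PySem.List.pyGet?, PySem.List.pyIdx?]

-- the dict A builds, as a list of per-symbol groups in first-occurrence order
lemma vsc_items_eq (ss : List (List String)) :
    (vscA_build ss).items = (PySem.Set.ofList ((vscPos ss).map (·.1))).map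
      (fun s => (s, ((vscPos ss).filter (fun p => p.1 == s)).map (·.2))) := by
  rw [vscA_build_eq]
  have hnd : (((vscPos ss)).foldl
      (fun d p => d.modify p.1 [] (fun l => l ++ [p.2])) PySem.Dict.empty).keys.Nodup :=
    PySem.Dict.nodup_keys_foldl_modify_key (vscPos ss) (fun p => p.1) []
      (fun _ x => fun l => l ++ [x.2]) PySem.Dict.empty PySem.Dict.nodup_keys_empty
  rw [PySem.Dict.items_eq_map_keys _ hnd []]
  have hkeys : (((vscPos ss)).foldl
      (fun d p => d.modify p.1 [] (fun l => l ++ [p.2])) PySem.Dict.empty).keys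
      = PySem.Set.ofList ((vscPos ss).map (·.1)) := by
    have := PySem.Dict.keys_foldl_modify_key (vscPos ss) (fun p => p.1) []
      (fun _ x => fun l => l ++ [x.2]) PySem.Dict.empty
    rw [this, PySem.Dict.keys_empty]
    rfl
  rw [hkeys]
  refine List.map_congr_left ?_
  intro k _
  rw [PySem.Dict.getD_foldl_modify_append (vscPos ss) PySem.Dict.empty k,
    PySem.Dict.getD_empty, List.nil_append]

lemma vscA_false_iff (cs : List (List Int)) (ss : List (List String)) :
    violate_symbolic_constraints cs ss = false ↔ vscCons cs (vscPos ss) := by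
  unfold violate_symbolic_constraints
  rw [vsc_items_eq, vscA_check_false_iff]
  constructor
  · intro h p hp
    have hsl : p.1 ∈ PySem.Set.ofList ((vscPos ss).map (·.1)) :=
      (PySem.Set.mem_ofList _ _).2 (List.mem_map_of_mem hp)
    obtain ⟨fl, fv, hfl, hrd, hall⟩ := h _ (List.mem_map_of_mem hsl)
    rw [vsc_pyGet?_zero, List.head?_map] at hfl
    refine ⟨fv, ?_, ?_⟩
    · exact hall p.2 (List.mem_map_of_mem (List.mem_filter.2 ⟨hp, by simp⟩))
    · intro q hq
      cases hh : ((vscPos ss).filter (fun r => r.1 == p.1)).head? with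
      | none => rw [hh] at hfl; cases hfl
      | some r =>
        rw [hh] at hfl
        have hfl2 : r.2 = fl := by cases hfl; rfl
        have hfirst : vscFirst? (vscPos ss) p.1 = some r.2 := by
          unfold vscFirst?
          rw [← List.head?_filter, hh]
          rfl
        rw [hfirst, hfl2] at hq
        cases hq
        exact hrd
  · intro h g hg
    obtain ⟨s, hsl, rfl⟩ := List.mem_map.1 hg
    have hs : s ∈ (vscPos ss).map (·.1) := (PySem.Set.mem_ofList _ _).1 hsl
    obtain ⟨p0, hp0, hp0s⟩ := List.mem_map.1 hs
    obtain ⟨q0, hq0⟩ : ∃ q0, ((vscPos ss).filter (fun r => r.1 == s)).head? = some q0 := by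
      cases hfl : (vscPos ss).filter (fun r => r.1 == s) with
      | nil =>
        have hmem : p0 ∈ (vscPos ss).filter (fun r => r.1 == s) :=
          List.mem_filter.2 ⟨hp0, by simp [hp0s]⟩
        rw [hfl] at hmem; cases hmem
      | cons a t => exact ⟨a, by simp⟩
    have hq0f : q0 ∈ (vscPos ss).filter (fun r => r.1 == s) :=
      List.mem_of_mem_head? (by rw [hq0]; rfl)
    have hq0mem : q0 ∈ vscPos ss := (List.mem_filter.1 hq0f).1
    have hq0s : q0.1 = s := by simpa using (List.mem_filter.1 hq0f).2
    have hfind : vscFirst? (vscPos ss) s = some q0.2 := by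
      unfold vscFirst?
      rw [← List.head?_filter, hq0]
      rfl
    obtain ⟨v, hv, -⟩ := h q0 hq0mem
    refine ⟨q0.2, v, ?_, hv, ?_⟩
    · rw [vsc_pyGet?_zero, List.head?_map, hq0]
      rfl
    · intro loc hloc
      obtain ⟨r, hrf, hr2⟩ := List.mem_map.1 hloc
      have hrmem : r ∈ vscPos ss := (List.mem_filter.1 hrf).1
      have hr1 : r.1 = s := by simpa using (List.mem_filter.1 hrf).2
      obtain ⟨u, hu, hcu⟩ := h r hrmem
      have huv : vscA_read cs q0.2 = some u := hcu q0.2 (by rw [hr1]; exact hfind)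
      rw [hv] at huv
      cases huv
      rw [← hr2]
      exact hu

-- ----- B side -----

-- B's whole double loop, flattened to the position list (proof-side only)
def vscB_run (cs : List (List Int)) (seen : PySem.Dict String Int) :
    List (String × (Int × Int)) → Option (PySem.Dict String Int)
  | [] => some seen
  | (s, loc) :: rest =>
    match vscA_read cs loc with
    | none => none
    | some v =>
      match seen.get? s with
      | some w => if w ≠ v then none else vscB_run cs seen rest
      | none => vscB_run cs (seen.insert s v) rest

lemma vscB_inner_eq (cs : List (List Int)) (i : Int) (pairs : List (Int × String))
    (seen : PySem.Dict String Int) :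
    vscB_inner cs i pairs seen
      = vscB_run cs seen (pairs.map (fun q => (q.2, (i, q.1)))) := by
  induction pairs generalizing seen with
  | nil => rfl
  | cons q rest ih =>
    obtain ⟨j, sym⟩ := q
    simp only [vscB_inner, vscB_run, List.map_cons, vscA_read]
    cases (PySem.List.pyGet? cs i).bind (fun row => PySem.List.pyGet? row j) with
    | none => rfl
    | some v =>
      cases seen.get? sym with
      | some w => by_cases hw : w = v <;> simp [hw, ih]
      | none => simp [ih]

lemma vscB_run_append (cs : List (List Int)) (seen : PySem.Dict String Int)
    (l1 l2 : List (String × (Int × Int))) :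
    vscB_run cs seen (l1 ++ l2)
      = (vscB_run cs seen l1).bind (fun s => vscB_run cs s l2) := by
  induction l1 generalizing seen with
  | nil => rfl
  | cons p rest ih =>
    obtain ⟨s, loc⟩ := p
    simp only [List.cons_append, vscB_run]
    cases vscA_read cs loc with
    | none => rfl
    | some v =>
      cases seen.get? s with
      | some w => by_cases hw : w = v <;> simp [hw, ih]
      | none => simp [ih]

lemma vscB_rows_eq (cs : List (List Int)) (ss : List (List String))
    (seen : PySem.Dict String Int) (s0 : Int) :
    vscB_rows cs (PySem.List.enumerate ss s0) seen
      = (vscB_run cs seen ((PySem.List.enumerate ss s0).flatMap (fun p =>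
          (PySem.List.enumerate p.2).map (fun q => (q.2, (p.1, q.1)))))).isNone := by
  induction ss generalizing seen s0 with
  | nil => simp [PySem.List.enumerate_nil, vscB_rows, vscB_run]
  | cons row rest ih =>
    rw [PySem.List.enumerate_cons]
    simp only [vscB_rows, List.flatMap_cons, vscB_inner_eq, vscB_run_append]
    cases vscB_run cs seen ((PySem.List.enumerate row).map (fun q => (q.2, (s0, q.1)))) with
    | none => simp
    | some seen' => simpa using ih seen' (s0 + 1)

-- the invariant of B's single pass
def vscQ (cs : List (List Int)) (seen : PySem.Dict String Int)
    (poss : List (String × (Int × Int))) : Prop :=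
  ∀ p ∈ poss, ∃ v, vscA_read cs p.2 = some v ∧
    (∀ w, seen.get? p.1 = some w → v = w) ∧
    (seen.get? p.1 = none → ∀ q, vscFirst? poss p.1 = some q → vscA_read cs q = some v)

lemma vscB_run_isSome_iff (cs : List (List Int)) (seen : PySem.Dict String Int)
    (poss : List (String × (Int × Int))) :
    (vscB_run cs seen poss).isSome ↔ vscQ cs seen poss := by
  induction poss generalizing seen with
  | nil => simp [vscB_run, vscQ]
  | cons p rest ih =>
    obtain ⟨s, loc⟩ := p
    cases hr : vscA_read cs loc with
    | none =>
      simp only [vscB_run, hr, Option.isSome_none, Bool.false_eq_true, false_iff]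
      intro h
      obtain ⟨v, hv, -⟩ := h (s, loc) (by simp)
      rw [hr] at hv; cases hv
    | some v =>
      cases hs : seen.get? s with
      | some w =>
        by_cases hw : w = v
        · subst hw
          have hrun : vscB_run cs seen ((s, loc) :: rest) = vscB_run cs seen rest := by
            simp [vscB_run, hr, hs]
          rw [hrun, ih]
          unfold vscQ
          constructor
          · intro h q hq
            rcases List.mem_cons.1 hq with hqq | hqq
            · subst hqq
              refine ⟨w, hr, ?_, ?_⟩
              · intro w' hw'
                have hw2 : seen.get? s = some w' := hw'
                rw [hs] at hw2; cases hw2; rfl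
              · intro hn
                have hn2 : seen.get? s = none := hn
                rw [hs] at hn2; cases hn2
            · obtain ⟨u, hu, c1, c2⟩ := h q hqq
              refine ⟨u, hu, c1, fun hn q' hq' => ?_⟩
              have hne : q.1 ≠ s := fun he => by rw [he, hs] at hn; cases hn
              rw [vscFirst?_cons_ne _ _ _ _ hne] at hq'
              exact c2 hn q' hq'
          · intro h q hq
            obtain ⟨u, hu, c1, c2⟩ := h q (List.mem_cons_of_mem _ hq)
            refine ⟨u, hu, c1, fun hn q' hq' => ?_⟩
            have hne : q.1 ≠ s := fun he => by rw [he, hs] at hn; cases hn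
            exact c2 hn q' (by rw [vscFirst?_cons_ne _ _ _ _ hne]; exact hq')
        · have hrun : vscB_run cs seen ((s, loc) :: rest) = none := by
            simp [vscB_run, hr, hs, hw]
          rw [hrun]
          simp only [Option.isSome_none, Bool.false_eq_true, false_iff]
          intro h
          obtain ⟨u, hu, c1, -⟩ := h (s, loc) (by simp)
          rw [hr] at hu; cases hu
          exact hw ((c1 w hs).symm)
      | none =>
        have hrun : vscB_run cs seen ((s, loc) :: rest)
            = vscB_run cs (seen.insert s v) rest := by
          simp [vscB_run, hr, hs]
        rw [hrun, ih]
        unfold vscQ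
        constructor
        · intro h q hq
          rcases List.mem_cons.1 hq with hqq | hqq
          · subst hqq
            refine ⟨v, hr, ?_, ?_⟩
            · intro w' hw'
              have hw2 : seen.get? s = some w' := hw'
              rw [hs] at hw2; cases hw2
            · intro _ q' hq'
              have hq2 : vscFirst? ((s, loc) :: rest) s = some q' := hq'
              rw [vscFirst?_cons_self] at hq2; cases hq2; exact hr
          · obtain ⟨u, hu, c1, c2⟩ := h q hqq
            by_cases hqs : q.1 = s
            · have hgi : (seen.insert s v).get? q.1 = some v := by
                rw [hqs]; exact PySem.Dict.get?_insert_self seen s v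
              have huv : u = v := c1 v hgi
              refine ⟨u, hu, ?_, ?_⟩
              · intro w' hw'
                rw [hqs, hs] at hw'; cases hw'
              · intro _ q' hq'
                rw [hqs, vscFirst?_cons_self] at hq'; cases hq'
                rw [hr, huv]
            · have hgi : (seen.insert s v).get? q.1 = seen.get? q.1 :=
                PySem.Dict.get?_insert_of_ne seen v hqs
              refine ⟨u, hu, ?_, ?_⟩
              · intro w' hw'
                exact c1 w' (by rw [hgi]; exact hw')
              · intro hn q' hq'
                rw [vscFirst?_cons_ne _ _ _ _ hqs] at hq'
                exact c2 (by rw [hgi]; exact hn) q' hq'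
        · intro h q hq
          obtain ⟨u, hu, c1, c2⟩ := h q (List.mem_cons_of_mem _ hq)
          by_cases hqs : q.1 = s
          · have huv : u = v := by
              have := c2 (by rw [hqs]; exact hs) loc (by rw [hqs, vscFirst?_cons_self])
              rw [hr] at this; cases this; rfl
            refine ⟨u, hu, ?_, ?_⟩
            · intro w' hw'
              rw [hqs, PySem.Dict.get?_insert_self seen s v] at hw'
              cases hw'; exact huv
            · intro hn
              rw [hqs, PySem.Dict.get?_insert_self seen s v] at hn; cases hn
          · have hgi : (seen.insert s v).get? q.1 = seen.get? q.1 :=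
              PySem.Dict.get?_insert_of_ne seen v hqs
            refine ⟨u, hu, ?_, ?_⟩
            · intro w' hw'
              exact c1 w' (by rw [← hgi]; exact hw')
            · intro hn q' hq'
              exact c2 (by rw [← hgi]; exact hn) q'
                (by rw [vscFirst?_cons_ne _ _ _ _ hqs]; exact hq')

lemma vscB_false_iff (cs : List (List Int)) (ss : List (List String)) :
    violate_symbolic_constraints_alt cs ss = false ↔ vscCons cs (vscPos ss) := by
  have h1 : violate_symbolic_constraints_alt cs ss
      = (vscB_run cs PySem.Dict.empty (vscPos ss)).isNone := by
    unfold violate_symbolic_constraints_alt vscPos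
    exact vscB_rows_eq cs ss PySem.Dict.empty 0
  rw [h1]
  have h2 : (vscB_run cs PySem.Dict.empty (vscPos ss)).isNone = false
      ↔ (vscB_run cs PySem.Dict.empty (vscPos ss)).isSome := by
    cases vscB_run cs PySem.Dict.empty (vscPos ss) <;> simp
  rw [h2, vscB_run_isSome_iff]
  unfold vscQ vscCons
  constructor
  · intro h p hp
    obtain ⟨v, hv, -, c2⟩ := h p hp
    exact ⟨v, hv, c2 (PySem.Dict.get?_empty p.1)⟩
  · intro h p hp
    obtain ⟨v, hv, c⟩ := h p hp
    refine ⟨v, hv, ?_, fun _ => c⟩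
    intro w hw
    rw [PySem.Dict.get?_empty] at hw; cases hw

-- ===== VERDICT (by name: the statement is the Claim_ definition above) =====
theorem violate_symbolic_constraints_spec : Claim_equal_violate_symbolic_constraints := by
  intro cs ss _
  unfold Spec_violate_symbolic_constraints
  have hA := vscA_false_iff cs ss
  have hB := vscB_false_iff cs ss
  cases h1 : violate_symbolic_constraints cs ss <;>
    cases h2 : violate_symbolic_constraints_alt cs ss <;>
    simp_all
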